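-- pv_equiv track=rewrite | github.com/TuragaLab/flyvis | flyvision/plots/plots.py | _network_graph_node_pos
-- ===== SOURCE A (Python) =====
-- def _network_graph_node_pos(layout, region_spacing=2):
--     # one way to compute (x,y) coordinates for nodes
--     x_coordinate = 0
--     types_per_column = 8
--     region_0 = "retina"
--     pos = {}
--     j = 0
--     for typ in layout:
--         if layout[typ] != region_0:
--             x_coordinate += region_spacing
--             j = 0
--         elif (j % types_per_column) == 0 and j != 0:
--             x_coordinate += 1
--         y_coordinate = types_per_column - 1 - j % types_per_column
--         pos[typ] = [x_coordinate, y_coordinate]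
--         region_0 = layout[typ]
--         j += 1
--     return pos
-- ===== SOURCE B (Python) =====
-- from itertools import groupby
--
-- def _network_graph_node_pos(layout, region_spacing=2):
--     # group the layout into maximal runs of consecutive equal regions,
--     # place each run as columns of 8, carrying the x coordinate across runs
--     pos = {}
--     x = 0
--     prev_region = "retina"
--     for region, group in groupby(layout.items(), key=lambda kv: kv[1]):
--         types = [typ for typ, _ in group]
--         if region != prev_region:
--             x += region_spacing
--         for j, typ in enumerate(types):
--             pos[typ] = [x + j // 8, 7 - j % 8]
--         x += (len(types) - 1) // 8
--         prev_region = region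
--     return pos
-- ===== Notes on version B (the rewrite author's own statement) =====
-- stated objective: idiomatic
-- what changed: B replaces A's single sweep with per-element state (x, previous region, j) by itertools.groupby: it splits the layout into maximal runs of equal regions and places each run's types by the closed form (x + j//8, 7 - j%8), carrying x across runs.
import Mathlib
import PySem

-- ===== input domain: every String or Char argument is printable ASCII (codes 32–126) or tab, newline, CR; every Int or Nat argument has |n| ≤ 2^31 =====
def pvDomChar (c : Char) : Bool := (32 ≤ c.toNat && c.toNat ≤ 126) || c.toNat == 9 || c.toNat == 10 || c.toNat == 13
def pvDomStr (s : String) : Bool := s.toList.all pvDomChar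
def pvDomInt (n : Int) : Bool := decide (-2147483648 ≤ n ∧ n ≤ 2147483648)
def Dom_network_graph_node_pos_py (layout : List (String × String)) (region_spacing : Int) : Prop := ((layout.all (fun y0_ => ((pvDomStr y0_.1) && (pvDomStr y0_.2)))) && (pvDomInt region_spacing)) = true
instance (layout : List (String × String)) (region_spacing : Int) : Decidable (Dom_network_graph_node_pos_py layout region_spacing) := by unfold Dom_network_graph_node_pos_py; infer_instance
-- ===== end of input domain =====

-- B replaces A's per-element sweep with state (x, previous region, j) by grouping the
-- layout into maximal runs of equal regions and placing each run by the closed form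
-- (x + j//8, 7 - j%8); same result, a simpler decomposition (objective: idiomatic).

-- ===== PORT A =====
-- one step of A's for-loop over the dict items; state = (x_coordinate, region_0, j, pos)
def pvStepA (region_spacing : Int)
    (st : Int × String × Int × PySem.Dict String (List Int)) (kv : String × String) :
    Int × String × Int × PySem.Dict String (List Int) :=
  let x := if kv.2 ≠ st.2.1 then st.1 + region_spacing
           else if PySem.Int.mod st.2.2.1 8 = 0 ∧ st.2.2.1 ≠ 0 then st.1 + 1 else st.1
  let j := if kv.2 ≠ st.2.1 then 0 else st.2.2.1
  let y := 8 - 1 - PySem.Int.mod j 8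
  (x, kv.2, j + 1, st.2.2.2.insert kv.1 [x, y])

def network_graph_node_pos_py (layout : List (String × String)) (region_spacing : Int) :
    List (String × List Int) :=
  -- the Python argument is a dict: normalise the association list to dict items first
  ((PySem.Dict.ofList layout).items.foldl (pvStepA region_spacing)
      (0, "retina", 0, PySem.Dict.empty)).2.2.2.items

-- ===== PORT B =====
-- itertools.groupby, ported by hand (exact): take the longest prefix with region r,
-- then the rest; pvGroupRuns yields the maximal runs (region, [types]) in order
def pvTakeRun (r : String) : List (String × String) → List String × List (String × String)
  | [] => ([], [])
  | kv :: rest =>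
    if kv.2 = r then
      let p := pvTakeRun r rest
      (kv.1 :: p.1, p.2)
    else ([], kv :: rest)

theorem pvTakeRun_rem_length (r : String) (l : List (String × String)) :
    (pvTakeRun r l).2.length ≤ l.length := by
  induction l with
  | nil => simp [pvTakeRun]
  | cons kv rest ih =>
    by_cases h : kv.2 = r
    · simp [pvTakeRun, h]; omega
    · simp [pvTakeRun, h]

def pvGroupRuns : List (String × String) → List (String × List String)
  | [] => []
  | kv :: rest =>
    let p := pvTakeRun kv.2 rest
    (kv.2, kv.1 :: p.1) :: pvGroupRuns p.2
termination_by l => l.length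
decreasing_by
  exact Nat.lt_succ_of_le (pvTakeRun_rem_length _ _)

-- one step of B's loop over the runs; state = (x, prev_region, pos)
def pvStepB (region_spacing : Int)
    (st : Int × String × PySem.Dict String (List Int)) (run : String × List String) :
    Int × String × PySem.Dict String (List Int) :=
  let x := if run.1 ≠ st.2.1 then st.1 + region_spacing else st.1
  let pos := (PySem.List.enumerate run.2 0).foldl
      (fun p it => p.insert it.2 [x + PySem.Int.floordiv it.1 8, 7 - PySem.Int.mod it.1 8])
      st.2.2
  (x + PySem.Int.floordiv ((run.2.length : Int) - 1) 8, run.1, pos)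

def network_graph_node_pos_py_alt (layout : List (String × String)) (region_spacing : Int) :
    List (String × List Int) :=
  ((pvGroupRuns (PySem.Dict.ofList layout).items).foldl (pvStepB region_spacing)
      (0, "retina", PySem.Dict.empty)).2.2.items

-- ===== PRECONDITION & SPEC =====
def Spec_network_graph_node_pos_py (layout : List (String × String)) (region_spacing : Int) (out : List (String × List Int)) : Prop := out = network_graph_node_pos_py_alt layout region_spacing
instance (layout : List (String × String)) (region_spacing : Int) (out : List (String × List Int)) : Decidable (Spec_network_graph_node_pos_py layout region_spacing out) := by unfold Spec_network_graph_node_pos_py; infer_instance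

-- ===== CLAIM (what is proved, stated in full; the proofs are below) =====
def Claim_equal_network_graph_node_pos_py : Prop := ∀ (layout : List (String × String)) (region_spacing : Int), Dom_network_graph_node_pos_py layout region_spacing → Spec_network_graph_node_pos_py layout region_spacing (network_graph_node_pos_py layout region_spacing)

-- ===== LEMMAS AND PROOFS =====

-- pvTakeRun splits l into a run of region r and the remainder
theorem pvTakeRun_split (r : String) (l : List (String × String)) :
    l = (pvTakeRun r l).1.map (fun t => (t, r)) ++ (pvTakeRun r l).2 := by
  induction l with
  | nil => simp [pvTakeRun]
  | cons kv rest ih =>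
    by_cases h : kv.2 = r
    · simp only [pvTakeRun, if_pos h, List.map_cons, List.cons_append]
      exact congrArg₂ _ (by rw [← h]) ih
    · simp [pvTakeRun, h]

-- the remainder does not start with region r
theorem pvTakeRun_rem_head (r : String) (l : List (String × String)) :
    ∀ kv ∈ (pvTakeRun r l).2.head?, kv.2 ≠ r := by
  induction l with
  | nil => simp [pvTakeRun]
  | cons kv rest ih =>
    by_cases h : kv.2 = r
    · simpa [pvTakeRun, h] using ih
    · simp [pvTakeRun, h]

-- when the next item's region differs from the current one, A's j is irrelevant
theorem foldA_j_irrel (rs : Int) (l : List (String × String)) (x : Int) (r : String)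
    (j j' : Int) (p : PySem.Dict String (List Int))
    (h : ∀ kv ∈ l.head?, kv.2 ≠ r) :
    (l.foldl (pvStepA rs) (x, r, j, p)).2.2.2 = (l.foldl (pvStepA rs) (x, r, j', p)).2.2.2 := by
  cases l with
  | nil => rfl
  | cons kv rest =>
    have hkv : kv.2 ≠ r := h kv (by simp)
    simp [List.foldl_cons, pvStepA, hkv]

-- A over a same-region run: closed form with column offset j/8
theorem foldA_run (rs : Int) (r : String) (ts : List String) (k : Nat) (x0 : Int)
    (pos : PySem.Dict String (List Int)) :
    (ts.map (fun t => (t, r))).foldl (pvStepA rs)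
        (x0 + PySem.Int.floordiv (k : Int) 8, r, (k : Int) + 1, pos)
      = (x0 + PySem.Int.floordiv ((k : Int) + ts.length) 8, r, (k : Int) + 1 + ts.length,
          (PySem.List.enumerate ts ((k : Int) + 1)).foldl
            (fun p it => p.insert it.2 [x0 + PySem.Int.floordiv it.1 8,
                                        7 - PySem.Int.mod it.1 8]) pos) := by
  induction ts generalizing k pos with
  | nil => simp [PySem.List.enumerate_nil]
  | cons t ts ih =>
    have hdiv : ∀ a : Int, PySem.Int.floordiv a 8 = a / 8 := fun a =>
      PySem.Int.floordiv_eq_ediv_of_pos (by norm_num)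
    have hmod : ∀ a : Int, PySem.Int.mod a 8 = a % 8 := fun a =>
      PySem.Int.mod_eq_emod_of_pos (by norm_num)
    have hstep : pvStepA rs (x0 + PySem.Int.floordiv (k : Int) 8, r, (k : Int) + 1, pos) (t, r)
        = (x0 + PySem.Int.floordiv ((k : Int) + 1) 8, r, (k : Int) + 2,
            pos.insert t [x0 + PySem.Int.floordiv ((k : Int) + 1) 8,
                          7 - PySem.Int.mod ((k : Int) + 1) 8]) := by
      have hc1 : ¬ ((t, r).2 ≠ r) := by simp
      by_cases hm : ((k : Int) + 1) % 8 = 0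
      · have hc2 : PySem.Int.mod ((k : Int) + 1) 8 = 0 ∧ ((k : Int) + 1) ≠ 0 :=
          ⟨by rw [hmod]; exact hm, by omega⟩
        simp only [pvStepA, if_neg hc1, if_pos hc2]
        rw [hdiv, hdiv, hmod]
        have e : x0 + (k : Int) / 8 + 1 = x0 + ((k : Int) + 1) / 8 := by omega
        rw [e]
        norm_num
        ring
      · have hc2 : ¬ (PySem.Int.mod ((k : Int) + 1) 8 = 0 ∧ ((k : Int) + 1) ≠ 0) := by
          rw [hmod]; tauto
        simp only [pvStepA, if_neg hc1, if_neg hc2]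
        rw [hdiv, hdiv, hmod]
        have e : x0 + (k : Int) / 8 = x0 + ((k : Int) + 1) / 8 := by omega
        rw [e]
        norm_num
        ring
    rw [List.map_cons, List.foldl_cons, hstep, PySem.List.enumerate_cons, List.foldl_cons]
    have H := ih (k + 1) (pos.insert t [x0 + PySem.Int.floordiv ((k : Int) + 1) 8,
                                        7 - PySem.Int.mod ((k : Int) + 1) 8])
    simp only [List.length_cons] at H ⊢
    push_cast at H ⊢
    ring_nf at H ⊢
    exact H

-- main invariant: A's sweep from j = 0 equals B's run loop
theorem foldAB (rs : Int) (l : List (String × String)) (x : Int) (r0 : String)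
    (pos : PySem.Dict String (List Int)) :
    (l.foldl (pvStepA rs) (x, r0, 0, pos)).2.2.2
      = ((pvGroupRuns l).foldl (pvStepB rs) (x, r0, pos)).2.2 := by
  induction l using pvGroupRuns.induct generalizing x r0 pos with
  | case1 => simp [pvGroupRuns]
  | case2 kv rest p ih =>
    have hremh := pvTakeRun_rem_head kv.2 rest
    have hmod0 : PySem.Int.mod 0 8 = 0 := by
      rw [PySem.Int.mod_eq_emod_of_pos (by norm_num)]; decide
    have hdiv0 : PySem.Int.floordiv 0 8 = 0 := by
      rw [PySem.Int.floordiv_eq_ediv_of_pos (by norm_num)]; decide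
    set x1 : Int := if kv.2 ≠ r0 then x + rs else x with hx1
    have hstep1 : pvStepA rs (x, r0, 0, pos) kv = (x1, kv.2, 1, pos.insert kv.1 [x1, 7]) := by
      have hc2 : ¬ (PySem.Int.mod 0 8 = 0 ∧ (0 : Int) ≠ 0) := by simp
      by_cases h : kv.2 ≠ r0
      · simp only [pvStepA, if_pos h, hmod0]
        rw [hx1, if_pos h]; norm_num
      · simp only [pvStepA, if_neg h, hmod0]
        rw [hx1, if_neg h]; norm_num
    conv_lhs => rw [List.foldl_cons, hstep1, pvTakeRun_split kv.2 rest, List.foldl_append]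
    have hrun := foldA_run rs kv.2 (pvTakeRun kv.2 rest).1 0 x1 (pos.insert kv.1 [x1, 7])
    norm_num [hdiv0] at hrun
    rw [hrun, foldA_j_irrel rs _ _ kv.2 _ 0 _ hremh, ih]
    conv_rhs => rw [pvGroupRuns]
    rw [List.foldl_cons]
    have hB : pvStepB rs (x, r0, pos) (kv.2, kv.1 :: (pvTakeRun kv.2 rest).1)
        = (x1 + PySem.Int.floordiv ((pvTakeRun kv.2 rest).1.length : Int) 8, kv.2,
           (PySem.List.enumerate (pvTakeRun kv.2 rest).1 1).foldl
             (fun p it => p.insert it.2 [x1 + PySem.Int.floordiv it.1 8,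
                                         7 - PySem.Int.mod it.1 8])
             (pos.insert kv.1 [x1, 7])) := by
      simp only [pvStepB]
      rw [← hx1, PySem.List.enumerate_cons, List.foldl_cons]
      norm_num [hdiv0, hmod0]
    rw [hB]
    simp only [PySem.Int.floordiv_eq_ediv_of_pos (show (0 : Int) < 8 by norm_num),
               PySem.Int.mod_eq_emod_of_pos (show (0 : Int) < 8 by norm_num)]
    rfl

-- ===== VERDICT (by name: the statement is the Claim_ definition above) =====
theorem network_graph_node_pos_py_spec : Claim_equal_network_graph_node_pos_py := by
  intro layout rs _
  unfold Spec_network_graph_node_pos_py network_graph_node_pos_py network_graph_node_pos_py_alt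
  rw [foldAB]
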